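-- pv_equiv track=rewrite | github.com/ednxl/Transcription-Parser | Transcription_Analyzer.py | find_specific_phrases
-- ===== SOURCE A (Python) =====
-- from collections import Counter
--
-- def find_specific_phrases(words, phrases):
--     specific_phrase_counts = Counter()
--     for i in range(len(words) - 4):
--         phrase = " ".join(words[i : i + 2])
--         if phrase in phrases:
--             specific_phrase_counts[phrase] += 1
--         phrase = " ".join(words[i : i + 3])
--         if phrase in phrases:
--             specific_phrase_counts[phrase] += 1
--         phrase = " ".join(words[i : i + 4])
--         if phrase in phrases:
--             specific_phrase_counts[phrase] += 1
--     return specific_phrase_counts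
-- ===== SOURCE B (Python) =====
-- from collections import Counter
--
-- def find_specific_phrases(words, phrases):
--     # Stage 1: materialise the flat list of all 2/3/4-word windows.
--     grams = []
--     for i in range(len(words) - 4):
--         for n in (2, 3, 4):
--             grams.append(" ".join(words[i:i + n]))
--     # Stage 2: keep only the target phrases.
--     hits = [g for g in grams if g in phrases]
--     # Stage 3: one entry per distinct hit, counted by a whole-list count
--     # (no incremental counter); first-occurrence order matches A's Counter.
--     out = Counter()
--     for g in hits:
--         if g not in out:
--             out[g] = hits.count(g)
--     return out
-- ===== Notes on version B (the rewrite author's own statement) =====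
-- stated objective: alternative
-- what changed: B is staged: it materialises the flat list of all 2/3/4-word windows, filters it to the target phrases, and then emits one entry per distinct hit whose count is computed by a whole-list .count() pass, replacing A's single pass with an incrementally updated Counter and inline membership tests.
import Mathlib
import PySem

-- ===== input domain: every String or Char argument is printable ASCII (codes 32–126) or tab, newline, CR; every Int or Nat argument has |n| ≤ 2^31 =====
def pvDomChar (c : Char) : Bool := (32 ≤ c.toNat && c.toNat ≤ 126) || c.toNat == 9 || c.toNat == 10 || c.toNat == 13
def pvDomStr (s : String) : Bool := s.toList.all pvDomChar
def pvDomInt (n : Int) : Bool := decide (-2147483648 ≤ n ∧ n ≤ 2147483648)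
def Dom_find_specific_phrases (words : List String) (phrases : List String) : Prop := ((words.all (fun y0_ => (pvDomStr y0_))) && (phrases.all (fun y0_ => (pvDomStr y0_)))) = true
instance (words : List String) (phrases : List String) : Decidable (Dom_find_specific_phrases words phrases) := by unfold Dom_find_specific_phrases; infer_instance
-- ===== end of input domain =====

-- B replaces A's single pass with an inline Counter by three stages: materialise the flat
-- list of all 2/3/4-word windows, filter it to the target phrases, then emit one entry per
-- distinct hit with its count taken by a whole-list count. Same cost class, different shape.

-- ===== PORT A =====
def find_specific_phrases (words : List String) (phrases : List String) : List (String × Int) :=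
  ((PySem.List.pyRange 0 ((words.length : Int) - 4) 1).foldl (fun d i =>
    let p2 := PySem.Str.join " " (PySem.List.slice words (some i) (some (i + 2)))
    let d := if phrases.contains p2 then d.modify p2 0 (· + 1) else d
    let p3 := PySem.Str.join " " (PySem.List.slice words (some i) (some (i + 3)))
    let d := if phrases.contains p3 then d.modify p3 0 (· + 1) else d
    let p4 := PySem.Str.join " " (PySem.List.slice words (some i) (some (i + 4)))
    if phrases.contains p4 then d.modify p4 0 (· + 1) else d)
    PySem.Dict.empty).items

-- ===== PORT B =====
def find_specific_phrases_alt (words : List String) (phrases : List String) : List (String × Int) :=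
  let grams := (PySem.List.pyRange 0 ((words.length : Int) - 4) 1).foldl (fun acc i =>
    ([2, 3, 4] : List Int).foldl (fun acc n =>
      acc ++ [PySem.Str.join " " (PySem.List.slice words (some i) (some (i + n)))]) acc) []
  let hits := grams.filter (fun g => phrases.contains g)
  (hits.foldl (fun out g =>
      if out.contains g then out else out.insert g (PySem.List.count hits g : Int))
    PySem.Dict.empty).items

-- ===== PRECONDITION & SPEC =====
def Spec_find_specific_phrases (words : List String) (phrases : List String) (out : List (String × Int)) : Prop := out = find_specific_phrases_alt words phrases
instance (words : List String) (phrases : List String) (out : List (String × Int)) : Decidable (Spec_find_specific_phrases words phrases out) := by unfold Spec_find_specific_phrases; infer_instance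

-- ===== CLAIM (what is proved, stated in full; the proofs are below) =====
def Claim_equal_find_specific_phrases : Prop := ∀ (words : List String) (phrases : List String), Dom_find_specific_phrases words phrases → Spec_find_specific_phrases words phrases (find_specific_phrases words phrases)

-- ===== LEMMAS AND PROOFS =====

-- the three n-grams produced at window i
def pvGrams (words : List String) (i : Int) : List String :=
  ([2, 3, 4] : List Int).map (fun n => PySem.Str.join " " (PySem.List.slice words (some i) (some (i + n))))

def pvAllGrams (words : List String) : List String :=
  (PySem.List.pyRange 0 ((words.length : Int) - 4) 1).flatMap (pvGrams words)

-- A's loop body at window i is the counting fold over the phrases-filtered grams of window i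
theorem pv_A_step (words phrases : List String) (d : PySem.Dict String Int) (i : Int) :
    (let p2 := PySem.Str.join " " (PySem.List.slice words (some i) (some (i + 2)))
     let d := if phrases.contains p2 then d.modify p2 0 (· + 1) else d
     let p3 := PySem.Str.join " " (PySem.List.slice words (some i) (some (i + 3)))
     let d := if phrases.contains p3 then d.modify p3 0 (· + 1) else d
     let p4 := PySem.Str.join " " (PySem.List.slice words (some i) (some (i + 4)))
     if phrases.contains p4 then d.modify p4 0 (· + 1) else d)
    = ((pvGrams words i).filter (fun p => phrases.contains p)).foldl
        (fun d x => d.modify x 0 (· + 1)) d := by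
  simp only [pvGrams, List.map_cons, List.map_nil, List.filter_cons, List.filter_nil]
  split_ifs <;> simp_all [List.foldl]

theorem pv_A_eq (words phrases : List String) :
    find_specific_phrases words phrases
      = (PySem.Dict.counter ((pvAllGrams words).filter (fun p => phrases.contains p))).items := by
  unfold find_specific_phrases
  rw [PySem.Dict.counter_eq_foldl, pvAllGrams, List.filter_flatMap, List.foldl_flatMap]
  congr 1
  apply PySem.List.foldl_congr_mem
  intro d i _
  exact pv_A_step words phrases d i

-- the dedup-and-whole-list-count loop of B builds exactly the Counter's items
theorem pv_B_dict (f : String → Int) (l : List String) (s : PySem.Set String)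
    (d : PySem.Dict String Int) (h : d.items = s.map (fun k => (k, f k))) :
    (l.foldl (fun out g => if out.contains g then out else out.insert g (f g)) d).items
      = (l.foldl PySem.Set.add s).map (fun k => (k, f k)) := by
  induction l generalizing s d with
  | nil => simpa using h
  | cons g t ih =>
    have hc : d.contains g = decide (g ∈ s) := by
      simp [PySem.Dict.contains, h, List.any_map, Function.comp_def, List.any_beq']
    by_cases hm : g ∈ s
    · rw [List.foldl_cons, List.foldl_cons, if_pos (by simp [hc, hm])]
      rw [show PySem.Set.add s g = s by simp [PySem.Set.add, PySem.Set.contains, hm]]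
      exact ih s d h
    · rw [List.foldl_cons, List.foldl_cons, if_neg (by simp [hc, hm])]
      rw [show PySem.Set.add s g = s ++ [g] by simp [PySem.Set.add, PySem.Set.contains, hm]]
      apply ih
      simp only [PySem.Dict.insert, hc, hm, decide_false, Bool.false_eq_true, if_false, h]
      simp

theorem pv_B_eq (words phrases : List String) :
    find_specific_phrases_alt words phrases
      = (PySem.Dict.counter ((pvAllGrams words).filter (fun p => phrases.contains p))).items := by
  unfold find_specific_phrases_alt
  have hg : (PySem.List.pyRange 0 ((words.length : Int) - 4) 1).foldl (fun acc i =>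
      ([2, 3, 4] : List Int).foldl (fun acc n =>
        acc ++ [PySem.Str.join " " (PySem.List.slice words (some i) (some (i + n)))]) acc) []
      = pvAllGrams words := by
    rw [pvAllGrams,
        show (PySem.List.pyRange 0 ((words.length : Int) - 4) 1).flatMap (pvGrams words)
           = [] ++ (PySem.List.pyRange 0 ((words.length : Int) - 4) 1).flatMap (pvGrams words)
          from (List.nil_append _).symm,
        ← PySem.List.foldl_append_eq_flatMap]
    apply PySem.List.foldl_congr_mem
    intro acc i _
    rw [PySem.List.foldl_append_singleton_eq_map]
    rfl
  simp only [hg]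
  rw [PySem.Dict.items_counter, PySem.Set.ofList_eq_foldl]
  exact pv_B_dict _ _ [] PySem.Dict.empty rfl

-- ===== VERDICT (by name: the statement is the Claim_ definition above) =====
theorem find_specific_phrases_spec : Claim_equal_find_specific_phrases := by
  intro words phrases _
  unfold Spec_find_specific_phrases
  rw [pv_A_eq, pv_B_eq]
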